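-- pv_equiv track=rewrite | github.com/Wagnard82/virtualarranger | streamlitt_app.py | get_octave_shift
-- ===== SOURCE A (Python) =====
-- def get_octave_shift(ps, strumento):
--     min_ps, max_ps = 0, 127
--     if strumento == "Violino I": min_ps, max_ps = 55, 96
--     elif strumento == "Violino II": min_ps, max_ps = 55, 84
--     elif strumento == "Viola": min_ps, max_ps = 48, 79
--     elif strumento == "Violoncello": min_ps, max_ps = 36, 67
--
--     shift = 0
--     temp_ps = ps
--     while temp_ps < min_ps:
--         temp_ps += 12
--         shift += 1
--     while temp_ps > max_ps:
--         temp_ps -= 12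
--         shift -= 1
--     return shift
-- ===== SOURCE B (Python) =====
-- RANGES = {
--     "Violino I": (55, 96),
--     "Violino II": (55, 84),
--     "Viola": (48, 79),
--     "Violoncello": (36, 67),
-- }
--
-- def get_octave_shift(ps, strumento):
--     min_ps, max_ps = RANGES.get(strumento, (0, 127))
--     adds = max(0, -((ps - min_ps) // 12))      # ceil((min_ps - ps)/12), clamped at 0
--     temp = ps + 12 * adds
--     subs = max(0, -((max_ps - temp) // 12))    # ceil((temp - max_ps)/12), clamped at 0
--     return adds - subs
-- ===== Notes on version B (the rewrite author's own statement) =====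
-- stated objective: faster
-- what changed: Replaces both octave while-loops by closed-form ceiling divisions (a range table lookup plus two integer divisions), removing iteration entirely.
import Mathlib
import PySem

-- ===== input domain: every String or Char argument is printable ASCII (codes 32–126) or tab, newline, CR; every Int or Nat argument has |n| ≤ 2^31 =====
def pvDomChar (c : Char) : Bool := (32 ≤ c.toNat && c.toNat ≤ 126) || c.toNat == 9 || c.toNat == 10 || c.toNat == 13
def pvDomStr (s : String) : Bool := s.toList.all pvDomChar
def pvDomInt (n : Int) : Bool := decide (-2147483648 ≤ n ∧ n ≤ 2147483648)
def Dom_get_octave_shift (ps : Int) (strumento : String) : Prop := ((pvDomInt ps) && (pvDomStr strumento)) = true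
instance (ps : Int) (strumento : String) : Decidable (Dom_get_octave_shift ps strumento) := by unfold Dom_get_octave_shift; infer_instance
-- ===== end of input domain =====

-- B replaces the two octave while-loops by closed-form ceiling divisions (O(1) instead of O(|ps|/12)).

-- ===== PORT A =====
-- the first while loop: while temp_ps < min_ps: temp_ps += 12; shift += 1
def pvUpA (minps temp shift : Int) : Int × Int :=
  if temp < minps then pvUpA minps (temp + 12) (shift + 1) else (temp, shift)
termination_by (minps - temp).toNat
decreasing_by omega

-- the second while loop: while temp_ps > max_ps: temp_ps -= 12; shift -= 1
def pvDownA (maxps temp shift : Int) : Int × Int :=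
  if temp > maxps then pvDownA maxps (temp - 12) (shift - 1) else (temp, shift)
termination_by (temp - maxps).toNat
decreasing_by omega

def get_octave_shift (ps : Int) (strumento : String) : Int :=
  let mm : Int × Int :=
    if strumento = "Violino I" then (55, 96)
    else if strumento = "Violino II" then (55, 84)
    else if strumento = "Viola" then (48, 79)
    else if strumento = "Violoncello" then (36, 67)
    else (0, 127)
  let r1 := pvUpA mm.1 ps 0
  let r2 := pvDownA mm.2 r1.1 r1.2
  r2.2

-- ===== PORT B =====
def pvRangesB : PySem.Dict String (Int × Int) :=
  PySem.Dict.ofList [("Violino I", (55, 96)), ("Violino II", (55, 84)), ("Viola", (48, 79)), ("Violoncello", (36, 67))]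

def get_octave_shift_alt (ps : Int) (strumento : String) : Int :=
  let mm := PySem.Dict.getD pvRangesB strumento (0, 127)
  let adds := max 0 (-(PySem.Int.floordiv (ps - mm.1) 12))
  let temp := ps + 12 * adds
  let subs := max 0 (-(PySem.Int.floordiv (mm.2 - temp) 12))
  adds - subs

-- ===== PRECONDITION & SPEC =====
def Spec_get_octave_shift (ps : Int) (strumento : String) (out : Int) : Prop := out = get_octave_shift_alt ps strumento
instance (ps : Int) (strumento : String) (out : Int) : Decidable (Spec_get_octave_shift ps strumento out) := by unfold Spec_get_octave_shift; infer_instance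

-- ===== CLAIM (what is proved, stated in full; the proofs are below) =====
def Claim_equal_get_octave_shift : Prop := ∀ (ps : Int) (strumento : String), Dom_get_octave_shift ps strumento → Spec_get_octave_shift ps strumento (get_octave_shift ps strumento)

-- ===== LEMMAS AND PROOFS =====

theorem pvUpA_closed (minps : Int) : ∀ (temp shift : Int),
    pvUpA minps temp shift =
      (temp + 12 * max 0 (-(PySem.Int.floordiv (temp - minps) 12)),
       shift + max 0 (-(PySem.Int.floordiv (temp - minps) 12))) := by
  intro temp shift
  fun_induction pvUpA minps temp shift with
  | case1 temp shift h ih =>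
    rw [ih]
    have h12 : PySem.Int.floordiv (temp - minps) 12 = (temp - minps) / 12 :=
      PySem.Int.floordiv_eq_ediv_of_pos (by omega)
    have h12' : PySem.Int.floordiv (temp + 12 - minps) 12 = (temp + 12 - minps) / 12 :=
      PySem.Int.floordiv_eq_ediv_of_pos (by omega)
    rw [h12, h12']
    simp only [Prod.mk.injEq]
    constructor <;> omega
  | case2 temp shift h =>
    have h12 : PySem.Int.floordiv (temp - minps) 12 = (temp - minps) / 12 :=
      PySem.Int.floordiv_eq_ediv_of_pos (by omega)
    rw [h12]
    have : max 0 (-((temp - minps) / 12)) = 0 := by omega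
    rw [this]; simp

theorem pvDownA_closed (maxps : Int) : ∀ (temp shift : Int),
    pvDownA maxps temp shift =
      (temp - 12 * max 0 (-(PySem.Int.floordiv (maxps - temp) 12)),
       shift - max 0 (-(PySem.Int.floordiv (maxps - temp) 12))) := by
  intro temp shift
  fun_induction pvDownA maxps temp shift with
  | case1 temp shift h ih =>
    rw [ih]
    have h12 : PySem.Int.floordiv (maxps - temp) 12 = (maxps - temp) / 12 :=
      PySem.Int.floordiv_eq_ediv_of_pos (by omega)
    have h12' : PySem.Int.floordiv (maxps - (temp - 12)) 12 = (maxps - (temp - 12)) / 12 :=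
      PySem.Int.floordiv_eq_ediv_of_pos (by omega)
    rw [h12, h12']
    simp only [Prod.mk.injEq]
    constructor <;> omega
  | case2 temp shift h =>
    have h12 : PySem.Int.floordiv (maxps - temp) 12 = (maxps - temp) / 12 :=
      PySem.Int.floordiv_eq_ediv_of_pos (by omega)
    rw [h12]
    have : max 0 (-((maxps - temp) / 12)) = 0 := by omega
    rw [this]; simp

theorem pv_core (ps minps maxps : Int) :
    (pvDownA maxps (pvUpA minps ps 0).1 (pvUpA minps ps 0).2).2 =
      (max 0 (-(PySem.Int.floordiv (ps - minps) 12))) -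
      (max 0 (-(PySem.Int.floordiv (maxps - (ps + 12 * max 0 (-(PySem.Int.floordiv (ps - minps) 12)))) 12))) := by
  rw [pvUpA_closed, pvDownA_closed]
  simp

-- ===== VERDICT (by name: the statement is the Claim_ definition above) =====
theorem get_octave_shift_spec : Claim_equal_get_octave_shift := by
  intro ps strumento _
  unfold Spec_get_octave_shift get_octave_shift get_octave_shift_alt
  have hitems : pvRangesB.items =
      [("Violino I", ((55 : Int), (96 : Int))), ("Violino II", (55, 84)),
       ("Viola", (48, 79)), ("Violoncello", (36, 67))] := by decide
  by_cases h1 : strumento = "Violino I"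
  · subst h1
    simp [PySem.Dict.getD, PySem.Dict.get?, hitems, pv_core]
  by_cases h2 : strumento = "Violino II"
  · subst h2
    simp [PySem.Dict.getD, PySem.Dict.get?, hitems, pv_core]
  by_cases h3 : strumento = "Viola"
  · subst h3
    simp [PySem.Dict.getD, PySem.Dict.get?, hitems, pv_core]
  by_cases h4 : strumento = "Violoncello"
  · subst h4
    simp [PySem.Dict.getD, PySem.Dict.get?, hitems, pv_core]
  · have e1 : ("Violino I" == strumento) = false := by simp [Ne.symm h1]
    have e2 : ("Violino II" == strumento) = false := by simp [Ne.symm h2]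
    have e3 : ("Viola" == strumento) = false := by simp [Ne.symm h3]
    have e4 : ("Violoncello" == strumento) = false := by simp [Ne.symm h4]
    simp [h1, h2, h3, h4, PySem.Dict.getD, PySem.Dict.get?, hitems, List.find?,
      e1, e2, e3, e4, pv_core]
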